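-- pv_equiv track=rewrite | github.com/mattwang44/leetcode | leetcode/00660_remove-9/660-remove-9.py | newInteger
-- ===== SOURCE A (Python) =====
-- def newInteger(n: int) -> int:
--     # 12 -> 9 + 3 -> 13
--     # 98 -> 81 + 9 + 8 -> 118
--     acc = 0
--     digit = 0
--     while n:
--         remainder = n % 9
--         n = n // 9
--         acc = acc + remainder * (10**digit)
--         digit += 1
--     return acc
-- ===== SOURCE B (Python) =====
-- def newInteger(n: int) -> int:
--     # MSB-first: find the largest power of 9 not exceeding n, then peel digits
--     # from the most significant end with acc = acc * 10 + n // p.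
--     if n == 0:
--         return 0
--     p = 1
--     while p * 9 <= n:
--         p *= 9
--     acc = 0
--     while p >= 1:
--         acc = acc * 10 + n // p
--         n %= p
--         p //= 9
--     return acc
-- ===== Notes on version B (the rewrite author's own statement) =====
-- stated objective: alternative
-- what changed: Replaces A's LSB-first remainder loop with positional powers of 10 (acc += (n%9) * 10**digit) by an MSB-first scheme: first find the largest power of 9 not exceeding n, then peel digits from the top with acc = acc*10 + n//p, n %= p, p //= 9, eliminating the exponentiation and the base-10 power bookkeeping.
import Mathlib
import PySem

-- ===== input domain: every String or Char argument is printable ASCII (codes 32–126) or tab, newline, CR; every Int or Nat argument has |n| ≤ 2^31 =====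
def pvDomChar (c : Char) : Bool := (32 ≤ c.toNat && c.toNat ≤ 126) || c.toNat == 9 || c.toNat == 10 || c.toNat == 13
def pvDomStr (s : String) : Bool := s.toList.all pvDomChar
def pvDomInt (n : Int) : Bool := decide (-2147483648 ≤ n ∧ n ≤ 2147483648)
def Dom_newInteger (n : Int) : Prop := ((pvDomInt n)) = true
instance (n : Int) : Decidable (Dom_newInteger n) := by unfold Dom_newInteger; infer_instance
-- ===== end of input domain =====

-- B replaces A's LSB-first remainder loop (acc += (n%9)*10^digit) by an MSB-first peel:
-- largest power of 9 first, then acc = acc*10 + n//p, n %= p; same values for n ≥ 0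
-- (A's while loop never terminates for negative n, which Pre_ excludes).


-- ===== PORT A =====
-- A's while loop as structural recursion on a fuel counter (totality device only:
-- the fuel n.toNat + 1 strictly exceeds the loop's iteration count whenever the
-- Python loop terminates; on Pre_ (n ≥ 0) the Python guard `while n` is `0 < n`,
-- and Python itself loops forever for n < 0).
def newIntegerGo : Nat → Int → Int → Nat → Int
  | 0, _, acc, _ => acc
  | fuel + 1, n, acc, digit =>
    if 0 < n then
      newIntegerGo fuel (PySem.Int.floordiv n 9) (acc + (PySem.Int.mod n 9) * 10 ^ digit) (digit + 1)
    else acc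

def newInteger (n : Int) : Int := newIntegerGo (n.toNat + 1) n 0 0

-- ===== PORT B =====
-- `while p * 9 <= n: p *= 9`, fuel-counted (the `0 < p` conjunct and the fuel are
-- totality devices only: Source B starts at p = 1 and the measure (n - p) shrinks each step)
def altPowGo : Nat → Int → Int → Int
  | 0, _, p => p
  | fuel + 1, n, p => if 0 < p ∧ p * 9 ≤ n then altPowGo fuel n (p * 9) else p

-- `while p >= 1: acc = acc*10 + n//p; n %= p; p //= 9`, fuel-counted likewise
def altLoopGo : Nat → Int → Int → Int → Int
  | 0, acc, _, _ => acc
  | fuel + 1, acc, n, p =>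
    if 1 ≤ p then
      altLoopGo fuel (acc * 10 + PySem.Int.floordiv n p) (PySem.Int.mod n p) (PySem.Int.floordiv p 9)
    else acc

def newInteger_alt (n : Int) : Int :=
  if n = 0 then 0
  else
    let p := altPowGo ((n - 1).toNat + 1) n 1
    altLoopGo (p.toNat + 1) 0 n p

-- ===== PRECONDITION & SPEC =====
-- Pre_ excludes negative n: there A's `while n` loop never terminates
-- (n//9 stabilises at -1), so Python A returns no value.
def Pre_newInteger (n : Int) : Prop := 0 ≤ n
instance (n : Int) : Decidable (Pre_newInteger n) := by unfold Pre_newInteger; infer_instance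
def pvWitness_newInteger : Int := (12)

def Spec_newInteger (n : Int) (out : Int) : Prop := out = newInteger_alt n
instance (n : Int) (out : Int) : Decidable (Spec_newInteger n out) := by unfold Spec_newInteger; infer_instance

-- ===== CLAIM (what is proved, stated in full; the proofs are below) =====
def Claim_equal_newInteger : Prop := ∀ (n : Int), Dom_newInteger n → Pre_newInteger n → Spec_newInteger n (newInteger n)

-- ===== LEMMAS AND PROOFS =====

theorem pvEdivLt (n : Int) (h : 0 < n) : (n / 9).toNat < n.toNat := by omega

-- canonical "base-9 digits read in base 10" value, LSB recurrence
def b9 (n : Int) : Int :=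
  if h : 0 < n then b9 (n / 9) * 10 + n % 9 else 0
termination_by n.toNat
decreasing_by exact pvEdivLt n h

theorem b9_zero : b9 0 = 0 := by rw [b9]; norm_num

theorem b9_small (n : Int) (h0 : 0 ≤ n) (h9 : n < 9) : b9 n = n := by
  rw [b9]
  rcases lt_or_eq_of_le h0 with h | h
  · rw [dif_pos h]
    have hd : n / 9 = 0 := by omega
    have hm : n % 9 = n := by omega
    rw [hd, hm, b9]
    norm_num
  · rw [dif_neg (by omega)]
    omega

theorem b9_split9 (r m : Int) (hr0 : 0 ≤ r) (hr9 : r < 9) (hm : 0 ≤ m) :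
    b9 (r + 9 * m) = b9 m * 10 + r := by
  by_cases h : r + 9 * m = 0
  · have : r = 0 ∧ m = 0 := by omega
    rw [this.1, this.2, b9]
    norm_num [b9_zero]
  · rw [b9, dif_pos (by omega)]
    have hd : (r + 9 * m) / 9 = m := by omega
    have hmm : (r + 9 * m) % 9 = r := by omega
    rw [hd, hmm]

-- digit splitting at 9^k
theorem b9_split (k : Nat) : ∀ n : Int, 0 ≤ n →
    b9 n = b9 (n / 9 ^ k) * 10 ^ k + b9 (n % 9 ^ k) := by
  induction k with
  | zero =>
    intro n hn
    rw [pow_zero, Int.ediv_one, Int.emod_one, b9_zero]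
    ring
  | succ k ih =>
    intro n hn
    have h9 : (0:Int) < 9 ^ k := by positivity
    have e1 : n / 9 ^ (k + 1) = (n / 9) / 9 ^ k := by
      rw [pow_succ', Int.ediv_ediv_of_nonneg (by norm_num)]
    have e2 : n % 9 ^ (k + 1) = n % 9 + 9 * ((n / 9) % 9 ^ k) := by
      rw [Int.emod_def n (9 ^ (k + 1)), Int.emod_def n 9, Int.emod_def (n / 9) (9 ^ k),
        e1, pow_succ']
      ring
    by_cases h0 : 0 < n
    · have hq : (0:Int) ≤ n / 9 := Int.ediv_nonneg hn (by norm_num)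
      have hmnn : (0:Int) ≤ (n / 9) % 9 ^ k := Int.emod_nonneg _ (by positivity)
      conv_lhs => rw [b9, dif_pos h0]
      rw [ih (n / 9) hq, e1, e2,
        b9_split9 (n % 9) ((n / 9) % 9 ^ k) (by omega) (by omega) hmnn]
      ring
    · have hn0 : n = 0 := by omega
      rw [hn0]
      norm_num [b9_zero, Int.zero_ediv, Int.zero_emod]

-- A's single pass equals b9 positionally (fuel-indexed loop invariant)
theorem go_eq : ∀ (fuel : Nat) (n acc : Int) (digit : Nat), n.toNat < fuel →
    newIntegerGo fuel n acc digit = acc + b9 n * 10 ^ digit := by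
  intro fuel
  induction fuel with
  | zero => intro n acc digit h; omega
  | succ fuel ih =>
    intro n acc digit h
    rw [newIntegerGo]
    by_cases hp : 0 < n
    · rw [if_pos hp]
      have hfd := PySem.Int.floordiv_eq_ediv_of_pos (a := n) (b := 9) (by omega)
      have hmd := PySem.Int.mod_eq_emod_of_pos (a := n) (b := 9) (by omega)
      have hlt : (PySem.Int.floordiv n 9).toNat < fuel := by rw [hfd]; omega
      rw [ih _ _ _ hlt]
      conv_rhs => rw [b9, dif_pos hp]
      rw [hfd, hmd]
      ring
    · rw [if_neg hp, b9, dif_neg hp]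
      ring

-- B's power search: returns some 9^j with n < 9^(j+1)
theorem altPow_spec : ∀ (fuel : Nat) (n p : Int) (k : Nat), (n - p).toNat < fuel → p = 9 ^ k →
    ∃ j : Nat, altPowGo fuel n p = 9 ^ j ∧ n < 9 ^ (j + 1) := by
  intro fuel
  induction fuel with
  | zero => intro n p k h _; omega
  | succ fuel ih =>
    intro n p k h hp
    have hpos : 0 < p := by rw [hp]; positivity
    rw [altPowGo]
    by_cases hg : 0 < p ∧ p * 9 ≤ n
    · rw [if_pos hg]
      exact ih n (p * 9) (k + 1) (by omega) (by rw [hp]; ring)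
    · rw [if_neg hg]
      refine ⟨k, hp, ?_⟩
      have hn : n < p * 9 := by
        by_contra hc
        exact hg ⟨hpos, by omega⟩
      calc n < p * 9 := hn
      _ = 9 ^ (k + 1) := by rw [hp]; ring

-- B's MSB loop invariant
theorem loop_eq (k : Nat) : ∀ (fuel : Nat) (acc n : Int), 0 ≤ n → n < 9 ^ (k + 1) →
    (9:Int) ^ k < (fuel : Int) → altLoopGo fuel acc n (9 ^ k) = acc * 10 ^ (k + 1) + b9 n := by
  induction k with
  | zero =>
    intro fuel acc n hn hlt hf
    have h1 : (0:Int) < 1 := by norm_num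
    rcases fuel with _ | fuel
    · norm_num at hf
    rw [altLoopGo, if_pos (by norm_num : (1:Int) ≤ 9 ^ 0)]
    have hf1 : 1 ≤ fuel := by
      by_contra hc
      interval_cases fuel
      · norm_num at hf
    rcases fuel with _ | fuel
    · omega
    have hfd : PySem.Int.floordiv n (9 ^ 0) = n := by
      rw [PySem.Int.floordiv_eq_ediv_of_pos (by norm_num)]; simp
    have hmd : PySem.Int.mod n (9 ^ 0) = 0 := by
      rw [PySem.Int.mod_eq_emod_of_pos (by norm_num)]; simp
    have hpd : PySem.Int.floordiv ((9:Int) ^ 0) 9 = 0 := by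
      rw [PySem.Int.floordiv_eq_ediv_of_pos (by norm_num)]; norm_num
    rw [hfd, hmd, hpd, altLoopGo, if_neg (by norm_num)]
    rw [b9_small n hn (by norm_num at hlt ⊢; omega)]
    ring
  | succ k ih =>
    intro fuel acc n hn hlt hf
    have hppos : (0:Int) < 9 ^ (k + 1) := by positivity
    rcases fuel with _ | fuel
    · norm_num at hf
      omega
    rw [altLoopGo, if_pos (by omega : (1:Int) ≤ 9 ^ (k + 1))]
    have hfd := PySem.Int.floordiv_eq_ediv_of_pos (a := n) (b := 9 ^ (k + 1)) hppos
    have hmd := PySem.Int.mod_eq_emod_of_pos (a := n) (b := 9 ^ (k + 1)) hppos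
    have hpd : PySem.Int.floordiv ((9:Int) ^ (k + 1)) 9 = 9 ^ k := by
      rw [PySem.Int.floordiv_eq_ediv_of_pos (by norm_num), pow_succ',
        Int.mul_ediv_cancel_left _ (by norm_num)]
    have hfk : (9:Int) ^ k < (fuel : Int) := by
      have : (9:Int) ^ k < 9 ^ (k + 1) := by
        calc (9:Int) ^ k < 9 ^ k * 9 := by nlinarith [pow_pos (by norm_num : (0:Int) < 9) k]
        _ = 9 ^ (k + 1) := by ring
      push_cast at hf ⊢
      omega
    rw [hfd, hmd, hpd,
      ih fuel (acc * 10 + n / 9 ^ (k + 1)) (n % 9 ^ (k + 1))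
        (Int.emod_nonneg _ (by positivity)) (Int.emod_lt_of_pos _ hppos) hfk]
    have hd9 : n / 9 ^ (k + 1) < 9 := by
      rw [Int.ediv_lt_iff_lt_mul hppos]
      calc n < 9 ^ (k + 1 + 1) := hlt
      _ = 9 * 9 ^ (k + 1) := by ring
    rw [b9_split (k + 1) n hn,
      b9_small (n / 9 ^ (k + 1)) (Int.ediv_nonneg hn (by positivity)) hd9]
    ring

theorem alt_eq_b9 (n : Int) (hn : 0 ≤ n) : newInteger_alt n = b9 n := by
  unfold newInteger_alt
  by_cases h0 : n = 0
  · rw [if_pos h0, h0, b9_zero]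
  · rw [if_neg h0]
    obtain ⟨j, hj, hlt⟩ := altPow_spec ((n - 1).toNat + 1) n 1 0 (by omega) (by norm_num)
    rw [hj, loop_eq j ((((9:Int) ^ j).toNat + 1)) 0 n hn hlt (by
      have : (0:Int) ≤ 9 ^ j := by positivity
      push_cast
      omega)]
    ring

-- ===== VERDICT (by name: the statement is the Claim_ definition above) =====
theorem newInteger_spec : Claim_equal_newInteger := by
  intro n _ hpre
  show newInteger n = newInteger_alt n
  rw [newInteger, go_eq _ _ _ _ (by omega), alt_eq_b9 n hpre]
  ring
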